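-- pv_equiv track=rewrite | github.com/faofao123/python | func2(return).py | getsum
-- ===== SOURCE A (Python) =====
-- def getsum(n):
--     s=0
--     ji=0
--     ou=0
--     for i in range(n):
--         s+=i
--         if i%2==0:
--             ou+=i
--         else :
--             ji+=i
--     return s,ji,ou
-- ===== SOURCE B (Python) =====
-- def getsum(n):
--     if n <= 0:
--         return (0, 0, 0)
--     m = n // 2          # number of odd values in 0..n-1
--     s = n * (n - 1) // 2
--     ji = m * m          # 1+3+...+(2m-1) = m^2
--     return (s, ji, s - ji)
-- ===== Notes on version B (the rewrite author's own statement) =====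
-- stated objective: faster
-- what changed: Replaced the O(n) loop over range(n) with closed-form arithmetic-series formulas for the total sum, the sum of the odd values and the sum of the even values.
import Mathlib
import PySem

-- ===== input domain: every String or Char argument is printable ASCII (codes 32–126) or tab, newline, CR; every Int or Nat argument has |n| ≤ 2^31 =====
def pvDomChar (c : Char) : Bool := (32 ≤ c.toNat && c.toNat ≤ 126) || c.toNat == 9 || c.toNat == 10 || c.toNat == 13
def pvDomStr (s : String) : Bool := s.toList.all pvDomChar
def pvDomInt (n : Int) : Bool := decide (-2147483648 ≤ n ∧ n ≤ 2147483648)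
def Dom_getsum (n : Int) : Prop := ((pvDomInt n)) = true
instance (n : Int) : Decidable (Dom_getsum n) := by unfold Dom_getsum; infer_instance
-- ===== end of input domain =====

-- B replaces A's O(n) loop by closed-form arithmetic-series formulas (faster, asymptotic).

-- ===== PORT A =====
-- transliteration of A's loop: state (s, ji, ou), one step per i in range(n)
def getsum (n : Int) : Int × Int × Int :=
  (PySem.List.pyRange 0 n 1).foldl
    (fun (acc : Int × Int × Int) i =>
      let s := acc.1 + i
      if PySem.Int.mod i 2 = 0 then (s, acc.2.1, acc.2.2 + i)
      else (s, acc.2.1 + i, acc.2.2))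
    (0, 0, 0)

-- ===== PORT B =====
def getsum_alt (n : Int) : Int × Int × Int :=
  if n ≤ 0 then (0, 0, 0)
  else
    let m := PySem.Int.floordiv n 2
    let s := PySem.Int.floordiv (n * (n - 1)) 2
    (s, m * m, s - m * m)

-- ===== PRECONDITION & SPEC =====
def Spec_getsum (n : Int) (out : Int × Int × Int) : Prop := out = getsum_alt n
instance (n : Int) (out : Int × Int × Int) : Decidable (Spec_getsum n out) := by unfold Spec_getsum; infer_instance

-- ===== CLAIM (what is proved, stated in full; the proofs are below) =====
def Claim_equal_getsum : Prop := ∀ (n : Int), Dom_getsum n → Spec_getsum n (getsum n)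

-- ===== LEMMAS AND PROOFS =====

theorem pv_sum_step (k : Nat) : (k + 1) * (k + 1 - 1) / 2 = k * (k - 1) / 2 + k := by
  cases k with
  | zero => rfl
  | succ m =>
    simp only [Nat.add_sub_cancel]
    rw [show (m + 1 + 1) * (m + 1) = (m + 1) * m + (m + 1) * 2 from by ring,
      Nat.add_mul_div_right _ _ (by norm_num : 0 < 2)]

theorem pv_odd_step (k : Nat) (hk : k % 2 = 1) :
    (k + 1) / 2 * ((k + 1) / 2) = k / 2 * (k / 2) + k := by
  obtain ⟨m, rfl⟩ : ∃ m, k = 2 * m + 1 := ⟨k / 2, by omega⟩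
  have h1 : (2 * m + 1 + 1) / 2 = m + 1 := by omega
  have h2 : (2 * m + 1) / 2 = m := by omega
  rw [h1, h2]; ring_nf

theorem getsum_alt_natCast (k : Nat) :
    getsum_alt (k : Int) =
      (((k * (k - 1) / 2 : Nat) : Int), (((k / 2) * (k / 2) : Nat) : Int),
        ((k * (k - 1) / 2 : Nat) : Int) - (((k / 2) * (k / 2) : Nat) : Int)) := by
  unfold getsum_alt
  rcases Nat.eq_zero_or_pos k with h | h
  · subst h; simp
  · rw [if_neg (by exact_mod_cast Nat.not_le.mpr h)]
    have hk1 : ((k : Int) - 1) = ((k - 1 : Nat) : Int) := by omega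
    show (PySem.Int.floordiv ((k : Int) * ((k : Int) - 1)) 2,
        PySem.Int.floordiv (k : Int) 2 * PySem.Int.floordiv (k : Int) 2,
        PySem.Int.floordiv ((k : Int) * ((k : Int) - 1)) 2 -
          PySem.Int.floordiv (k : Int) 2 * PySem.Int.floordiv (k : Int) 2) = _
    have h1 : PySem.Int.floordiv ((k * (k - 1) : Nat) : Int) 2 = ((k * (k - 1) / 2 : Nat) : Int) :=
      PySem.Int.floordiv_natCast _ 2
    have h2 : PySem.Int.floordiv (k : Int) 2 = ((k / 2 : Nat) : Int) :=
      PySem.Int.floordiv_natCast k 2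
    rw [hk1, ← Nat.cast_mul, h1, h2, ← Nat.cast_mul]

theorem getsum_nat (k : Nat) : getsum (k : Int) = getsum_alt (k : Int) := by
  induction k with
  | zero => simp [getsum, getsum_alt, PySem.List.pyRange_one_eq_nil]
  | succ k ih =>
    have hsplit : PySem.List.pyRange 0 ((k + 1 : Nat) : Int) 1 =
        PySem.List.pyRange 0 (k : Int) 1 ++ [(k : Int)] := by
      have := PySem.List.pyRange_one_succ_right (a := 0) (b := (k : Int)) (by positivity)
      push_cast
      exact this
    unfold getsum at ih ⊢
    rw [hsplit, List.foldl_append, ih]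
    rw [getsum_alt_natCast k, getsum_alt_natCast (k + 1)]
    simp only [List.foldl_cons, List.foldl_nil]
    have hmod : PySem.Int.mod (k : Int) 2 = ((k % 2 : Nat) : Int) := PySem.Int.mod_natCast k 2
    rw [pv_sum_step k]
    by_cases hk : k % 2 = 0
    · rw [hmod, hk, Nat.cast_zero, if_pos rfl]
      have h3 : (k + 1) / 2 = k / 2 := by omega
      rw [h3]
      refine Prod.ext ?_ (Prod.ext rfl ?_) <;> push_cast <;> ring
    · have hk1 : k % 2 = 1 := by omega
      rw [hmod, hk1, if_neg (by decide)]
      rw [pv_odd_step k hk1]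
      refine Prod.ext ?_ (Prod.ext ?_ ?_) <;> push_cast <;> ring

-- ===== VERDICT (by name: the statement is the Claim_ definition above) =====
theorem getsum_spec : Claim_equal_getsum := by
  intro n _
  unfold Spec_getsum
  by_cases h : n ≤ 0
  · simp [getsum, getsum_alt, PySem.List.pyRange_one_eq_nil h, if_pos h]
  · have h0 : 0 ≤ n := by omega
    obtain ⟨k, rfl⟩ := Int.eq_ofNat_of_zero_le h0
    exact getsum_nat k
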